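-- pv_equiv track=rewrite | github.com/scottshady/FCgraph | fcs_rigde_plot_gui.py | detect_fitc_channel
-- ===== SOURCE A (Python) =====
-- def detect_fitc_channel(channel_names):
--     """
--     自动识别FITC通道（优先）
--
--     参数:
--         channel_names: 通道名列表
--
--     返回:
--         通道名（字符串）或None
--     """
--     # 排除散射光和时间通道
--     exclude_patterns = ['FSC', 'SSC', 'Time', 'Width']
--     fluorescence_candidates = [
--         ch for ch in channel_names
--         if not any(pattern in ch for pattern in exclude_patterns)
--     ]
--
--     # 优先识别FITC/488通道
--     fitc_keywords = ['FITC', 'FL1', 'B530', '488']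
--     matched_channels = []
--
--     for keyword in fitc_keywords:
--         matched = [ch for ch in fluorescence_candidates if keyword.upper() in ch.upper()]
--         if matched:
--             matched_channels.extend(matched)
--
--     if matched_channels:
--         # 优先选择高度通道（H），如果没有则选择面积通道（A）
--         height_channels = [ch for ch in matched_channels if '-H' in ch or 'H-' in ch]
--         if height_channels:
--             return height_channels[0]
--         else:
--             # 如果没有高度通道，使用面积通道
--             area_channels = [ch for ch in matched_channels if '-A' in ch or 'A-' in ch]
--             if area_channels:
--                 return area_channels[0]
--             else:
--                 return matched_channels[0]
--
--     # 如果找不到FITC，返回第一个非散射光通道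
--     if fluorescence_candidates:
--         return fluorescence_candidates[0]
--
--     return None
-- ===== SOURCE B (Python) =====
-- def detect_fitc_channel(channel_names):
--     # Single pass with an accumulator: instead of building candidate/matched lists
--     # and cascading filter passes, scan once keeping the best (rank, keyword-index)
--     # seen so far (strict improvement = stable first-minimum) plus the first
--     # non-scatter channel as fallback.
--     keywords = ['FITC', 'FL1', 'B530', '488']
--     best = None        # (rank, kw_index, channel)
--     first_fluor = None
--     for ch in channel_names:
--         if 'FSC' in ch or 'SSC' in ch or 'Time' in ch or 'Width' in ch:
--             continue
--         if first_fluor is None: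
--             first_fluor = ch
--         up = ch.upper()
--         k = next((i for i, kw in enumerate(keywords) if kw in up), None)
--         if k is None:
--             continue
--         r = 0 if ('-H' in ch or 'H-' in ch) else (1 if ('-A' in ch or 'A-' in ch) else 2)
--         if best is None or r < best[0] or (r == best[0] and k < best[1]):
--             best = (r, k, ch)
--     return best[2] if best is not None else first_fluor
-- ===== Notes on version B (the rewrite author's own statement) =====
-- stated objective: alternative
-- what changed: A builds a candidate list, a keyword-grouped matched list, and cascades three filter passes (height, else area, else first); B is a single pass over the input keeping the best (rank, keyword-index) candidate seen so far plus the first non-scatter channel as fallback, building no intermediate lists.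
import Mathlib
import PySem

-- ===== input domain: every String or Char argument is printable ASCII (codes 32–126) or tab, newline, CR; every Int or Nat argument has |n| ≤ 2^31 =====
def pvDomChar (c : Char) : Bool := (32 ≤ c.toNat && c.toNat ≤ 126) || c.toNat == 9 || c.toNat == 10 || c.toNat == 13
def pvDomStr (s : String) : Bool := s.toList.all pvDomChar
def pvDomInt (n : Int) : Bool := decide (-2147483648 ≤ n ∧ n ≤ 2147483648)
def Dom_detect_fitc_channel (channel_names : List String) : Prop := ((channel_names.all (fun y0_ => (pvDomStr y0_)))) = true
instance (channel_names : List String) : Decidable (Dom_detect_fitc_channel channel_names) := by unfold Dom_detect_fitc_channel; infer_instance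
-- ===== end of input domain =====

-- B replaces A's list-building pipeline (filter, keyword-grouped matched list, three cascaded
-- filter passes) by a single pass that keeps the best (rank, keyword-index) candidate and the
-- first non-scatter channel as fallback (alternative decomposition, same cost).

-- ===== PORT A =====
def detect_fitc_channel (channel_names : List String) : Option String :=
  let exclude_patterns : List String := ["FSC", "SSC", "Time", "Width"]
  let fluorescence_candidates :=
    channel_names.filter (fun ch => !(exclude_patterns.any (fun p => PySem.Str.isIn p ch)))
  let fitc_keywords : List String := ["FITC", "FL1", "B530", "488"]
  let matched_channels :=
    fitc_keywords.foldl (fun acc keyword =>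
      let matched := fluorescence_candidates.filter
        (fun ch => PySem.Str.isIn (PySem.Str.upper keyword) (PySem.Str.upper ch))
      if matched ≠ [] then acc ++ matched else acc) []
  if matched_channels ≠ [] then
    let height_channels := matched_channels.filter
      (fun ch => PySem.Str.isIn "-H" ch || PySem.Str.isIn "H-" ch)
    if height_channels ≠ [] then
      height_channels.head?
    else
      let area_channels := matched_channels.filter
        (fun ch => PySem.Str.isIn "-A" ch || PySem.Str.isIn "A-" ch)
      if area_channels ≠ [] then
        area_channels.head?
      else
        matched_channels.head?
  else if fluorescence_candidates ≠ [] then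
    fluorescence_candidates.head?
  else
    none

-- ===== PORT B =====
-- loop body of Source B's single for-loop (state = (best, first_fluor))
def detect_fitc_channel_altStep (st : Option (Int × Int × String) × Option String) (ch : String) :
    Option (Int × Int × String) × Option String :=
  if PySem.Str.isIn "FSC" ch || PySem.Str.isIn "SSC" ch || PySem.Str.isIn "Time" ch || PySem.Str.isIn "Width" ch then
    st
  else
    let ff := match st.2 with | none => some ch | some f => some f
    -- k = next((i for i, kw in enumerate(keywords) if kw in up), None), up = ch.upper()
    match (PySem.List.enumerate ["FITC", "FL1", "B530", "488"]).find? (fun p => PySem.Str.isIn p.2 (PySem.Str.upper ch)) with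
    | none => (st.1, ff)
    | some (k, _) =>
      let r : Int := if PySem.Str.isIn "-H" ch || PySem.Str.isIn "H-" ch then 0
                     else if PySem.Str.isIn "-A" ch || PySem.Str.isIn "A-" ch then 1 else 2
      match st.1 with
      | none => (some (r, k, ch), ff)
      | some (rb, kb, chb) =>
        if r < rb ∨ (r = rb ∧ k < kb) then (some (r, k, ch), ff) else (some (rb, kb, chb), ff)

def detect_fitc_channel_alt (channel_names : List String) : Option String :=
  let st := channel_names.foldl detect_fitc_channel_altStep (none, none)
  match st.1 with
  | some (_, _, ch) => some ch
  | none => st.2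

-- ===== PRECONDITION & SPEC =====
def Spec_detect_fitc_channel (channel_names : List String) (out : Option String) : Prop := out = detect_fitc_channel_alt channel_names
instance (channel_names : List String) (out : Option String) : Decidable (Spec_detect_fitc_channel channel_names out) := by unfold Spec_detect_fitc_channel; infer_instance

-- ===== CLAIM (what is proved, stated in full; the proofs are below) =====
def Claim_equal_detect_fitc_channel : Prop := ∀ (channel_names : List String), Dom_detect_fitc_channel channel_names → Spec_detect_fitc_channel channel_names (detect_fitc_channel channel_names)

-- ===== LEMMAS AND PROOFS =====

-- the exclusion test ('FSC' in ch or …), shared by both canonical forms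
def pvExcl (ch : String) : Bool :=
  PySem.Str.isIn "FSC" ch || PySem.Str.isIn "SSC" ch || PySem.Str.isIn "Time" ch || PySem.Str.isIn "Width" ch

-- keyword match k, height/area tests
def pvM (k : Nat) (ch : String) : Bool :=
  match k with
  | 0 => PySem.Str.isIn "FITC" (PySem.Str.upper ch)
  | 1 => PySem.Str.isIn "FL1" (PySem.Str.upper ch)
  | 2 => PySem.Str.isIn "B530" (PySem.Str.upper ch)
  | 3 => PySem.Str.isIn "488" (PySem.Str.upper ch)
  | _ => false

def pvH (ch : String) : Bool := PySem.Str.isIn "-H" ch || PySem.Str.isIn "H-" ch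
def pvA (ch : String) : Bool := PySem.Str.isIn "-A" ch || PySem.Str.isIn "A-" ch

-- first keyword index, rank, and flattened priority 4*rank+kw of a channel
def pvKw (ch : String) : Option Nat :=
  if pvM 0 ch then some 0 else if pvM 1 ch then some 1 else if pvM 2 ch then some 2
  else if pvM 3 ch then some 3 else none
def pvR (ch : String) : Nat := if pvH ch then 0 else if pvA ch then 1 else 2
def pvP (ch : String) : Option Nat := (pvKw ch).map (fun k => 4 * pvR ch + k)

-- A's j-th selection predicate (row j/4: height / area / any; column j%4: keyword)
def pvQ (j : Nat) (ch : String) : Bool :=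
  pvM (j % 4) ch && (if j / 4 = 0 then pvH ch else if j / 4 = 1 then pvA ch else true)

-- first channel whose priority is j, tried for j = i, i+1, …, i+n-1
def pvD (i n : Nat) (cs : List String) : Option (Nat × String) :=
  match n with
  | 0 => none
  | n+1 => ((cs.find? (fun ch => pvP ch == some i)).map (fun ch => (i, ch))).or (pvD (i+1) n cs)

-- A's selection chain: first channel satisfying pvQ i, else pvQ (i+1), …
def pvE (i n : Nat) (cs : List String) : Option String :=
  match n with
  | 0 => none
  | n+1 => (cs.find? (pvQ i)).or (pvE (i+1) n cs)

def decP (t : Nat × String) : Int × Int × String := ((t.1 / 4 : Nat), ((t.1 % 4 : Nat) : Int), t.2)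

-- best-candidate / first-fluor components of Source B's loop body
def pvStepB (b : Option (Int × Int × String)) (ch : String) : Option (Int × Int × String) :=
  match (PySem.List.enumerate ["FITC", "FL1", "B530", "488"]).find? (fun p => PySem.Str.isIn p.2 (PySem.Str.upper ch)) with
  | none => b
  | some (k, _) =>
    let r : Int := if PySem.Str.isIn "-H" ch || PySem.Str.isIn "H-" ch then 0
                   else if PySem.Str.isIn "-A" ch || PySem.Str.isIn "A-" ch then 1 else 2
    match b with
    | none => some (r, k, ch)
    | some (rb, kb, chb) => if r < rb ∨ (r = rb ∧ k < kb) then some (r, k, ch) else some (rb, kb, chb)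

def pvStepF (f : Option String) (ch : String) : Option String :=
  match f with | none => some ch | some v => some v

-- canonical common form of both programs
def pvCanon (cs : List String) : Option String :=
  match pvD 0 12 cs with
  | some (_, ch) => some ch
  | none => cs.head?

theorem pvP_lt {ch : String} {j : Nat} (h : pvP ch = some j) : j < 12 ∧ pvQ j ch = true := by
  revert h
  unfold pvP pvKw pvR
  cases h0 : pvM 0 ch <;> cases h1 : pvM 1 ch <;> cases h2 : pvM 2 ch <;> cases h3 : pvM 3 ch <;>
    cases hh : pvH ch <;> cases ha : pvA ch <;>
    simp only [Bool.false_eq_true, if_pos, if_neg, if_true, if_false, Option.map_some, Option.map_none] <;>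
    intro h <;> simp at h <;>
    (cases h; exact ⟨by norm_num, by simp [pvQ, h0, h1, h2, h3, hh, ha]⟩)

theorem pvP_min {ch : String} {i : Nat} (hi : i < 12) (hq : pvQ i ch = true) :
    ∃ p, pvP ch = some p ∧ p ≤ i := by
  unfold pvQ at hq
  unfold pvP pvKw pvR
  cases h0 : pvM 0 ch <;> cases h1 : pvM 1 ch <;> cases h2 : pvM 2 ch <;> cases h3 : pvM 3 ch <;>
    cases hh : pvH ch <;> cases ha : pvA ch <;>
    simp only [h0, h1, h2, h3, hh, ha, Bool.false_eq_true, if_pos, if_neg, if_true, if_false,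
      Option.map_some, Option.map_none] <;>
    first
      | (refine ⟨_, rfl, ?_⟩; interval_cases i <;> (simp_all; done))
      | (exfalso; interval_cases i <;> (simp_all; done))

theorem pvFind_congr {α : Type} {p q : α → Bool} {l : List α} (h : ∀ x ∈ l, p x = q x) :
    l.find? p = l.find? q := by
  induction l with
  | nil => rfl
  | cons x t ih =>
    have hx := h x (by simp)
    simp only [List.find?_cons, hx]
    cases q x
    · exact ih (fun y hy => h y (by simp [hy]))
    · rfl

theorem pvOr_some_getD {α : Type} (o : Option α) (a b : α) : (o.or (some a)).getD b = o.getD a := by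
  cases o <;> rfl

theorem pvOr_some_map {α β : Type} (o : Option α) (f : α → β) (a : α) :
    (o.or (some a)).map f = some (f (o.getD a)) := by
  cases o <;> rfl

theorem pvD_nil (i n : Nat) : pvD i n [] = none := by
  induction n generalizing i with
  | zero => rfl
  | succ n ih => simp [pvD, ih]

theorem pvD_cons (n i : Nat) (x : String) (cs : List String) :
    pvD i n (x :: cs) =
      match pvP x with
      | none => pvD i n cs
      | some j => if i ≤ j ∧ j < i + n then (pvD i (j - i) cs).or (some (j, x)) else pvD i n cs := by
  induction n generalizing i with
  | zero =>
    cases hp : pvP x with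
    | none => rfl
    | some j => simp only [pvD]; rw [if_neg (by omega)]
  | succ n ih =>
    cases hp : pvP x with
    | none =>
      simp only [pvD, List.find?_cons, hp]
      norm_num
      rw [ih (i+1)]
      simp [hp]
    | some j =>
      by_cases hji : j = i
      · subst hji
        simp only [pvD, List.find?_cons, hp, beq_self_eq_true]
        rw [if_pos (by omega)]
        simp [pvD]
      · have hne : (pvP x == some i) = false := by simp [hp, hji]
        simp only [pvD, List.find?_cons, hne]
        rw [ih (i+1)]
        simp only [hp]
        by_cases hc : i ≤ j ∧ j < i + (n + 1)
        · rw [if_pos hc]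
          have hc' : i + 1 ≤ j ∧ j < (i + 1) + n := by omega
          rw [if_pos hc']
          have hsub : j - i = (j - (i + 1)) + 1 := by omega
          rw [hsub]
          simp only [pvD, List.find?_cons, hne, Option.or_assoc]
        · rw [if_neg hc]
          have hc' : ¬ ((i + 1) ≤ j ∧ j < (i + 1) + n) := by omega
          rw [if_neg hc']

theorem pvD_none_of (i n : Nat) (cs : List String) (h : ∀ ch ∈ cs, pvP ch = none) :
    pvD i n cs = none := by
  induction n generalizing i with
  | zero => rfl
  | succ n ih =>
    have hf : cs.find? (fun ch => pvP ch == some i) = none := by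
      rw [List.find?_eq_none]
      intro x hx
      simp [h x hx]
    simp [pvD, hf, ih]

theorem pvE_eq_D (n : Nat) : ∀ (i : Nat) (cs : List String), i + n ≤ 12 →
    (∀ ch ∈ cs, ∀ j, j < i → pvQ j ch = false) →
    pvE i n cs = (pvD i n cs).map Prod.snd := by
  induction n with
  | zero => intro i cs _ _; rfl
  | succ n ih =>
    intro i cs hin hlt
    have hfind : cs.find? (fun ch => pvP ch == some i) = cs.find? (pvQ i) := by
      apply pvFind_congr
      intro x hx
      cases hq : pvQ i x with
      | true =>
        obtain ⟨p, hp, hpi⟩ := pvP_min (by omega) hq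
        have hQp := (pvP_lt hp).2
        have hpi' : p = i := by
          by_contra hne
          exact absurd hQp (by simp [hlt x hx p (by omega)])
        simp [hp, hpi']
      | false =>
        cases hpx : pvP x with
        | none => simp
        | some j =>
          by_cases hji : j = i
          · subst hji
            exact absurd (pvP_lt hpx).2 (by simp [hq])
          · simp [hji]
    simp only [pvE, pvD, hfind]
    cases hF : cs.find? (pvQ i) with
    | some c => simp
    | none =>
      simp only [Option.map_none, Option.none_or, Option.map_or]
      have hext : ∀ ch ∈ cs, ∀ j, j < i + 1 → pvQ j ch = false := by
        intro ch hch j hj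
        by_cases hji : j = i
        · subst hji
          have := List.find?_eq_none.mp hF ch hch
          simpa using this
        · exact hlt ch hch j (by omega)
      have := ih (i+1) cs (by omega) hext
      simpa using this

theorem pvKw_lt {ch : String} {k : Nat} (h : pvKw ch = some k) : k < 4 := by
  unfold pvKw at h
  split_ifs at h <;> simp_all <;> omega

theorem pvStepB_find (ch : String) :
    (PySem.List.enumerate ["FITC","FL1","B530","488"]).find? (fun p => PySem.Str.isIn p.2 (PySem.Str.upper ch)) =
      (pvKw ch).map (fun (k : Nat) => ((k : Int), (["FITC","FL1","B530","488"] : List String).getD k "")) := by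
  unfold pvKw
  cases h0 : PySem.Str.isIn "FITC" (PySem.Str.upper ch) <;>
    cases h1 : PySem.Str.isIn "FL1" (PySem.Str.upper ch) <;>
      cases h2 : PySem.Str.isIn "B530" (PySem.Str.upper ch) <;>
        cases h3 : PySem.Str.isIn "488" (PySem.Str.upper ch) <;>
          simp only [PySem.List.enumerate_cons, PySem.List.enumerate_nil, List.find?,
            pvM, h0, h1, h2, h3] <;> simp

theorem pvStepB_none {ch : String} (h : pvP ch = none) (b : Option (Int × Int × String)) :
    pvStepB b ch = b := by
  have hk : pvKw ch = none := by
    unfold pvP at h; cases hkw : pvKw ch <;> simp_all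
  unfold pvStepB
  rw [pvStepB_find, hk]
  simp

theorem pvStepB_some {ch : String} {j : Nat} (h : pvP ch = some j) :
    pvStepB none ch = some (decP (j, ch)) ∧
    ∀ (j' : Nat) (chb : String), pvStepB (some (decP (j', chb))) ch =
      if j < j' then some (decP (j, ch)) else some (decP (j', chb)) := by
  obtain ⟨k, hk, hj⟩ : ∃ k, pvKw ch = some k ∧ j = 4 * pvR ch + k := by
    unfold pvP at h; cases hkw : pvKw ch <;> simp_all
  have hk4 := pvKw_lt hk
  have hr : (if PySem.Str.isIn "-H" ch || PySem.Str.isIn "H-" ch then (0:Int)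
             else if PySem.Str.isIn "-A" ch || PySem.Str.isIn "A-" ch then 1 else 2)
      = ((pvR ch : Nat) : Int) := by
    unfold pvR pvH pvA; split_ifs <;> simp
  have hdiv : j / 4 = pvR ch := by omega
  have hmod : j % 4 = k := by omega
  constructor
  · unfold pvStepB
    rw [pvStepB_find, hk]
    simp only [Option.map_some, decP, hdiv, hmod, hr]
  · intro j' chb
    unfold pvStepB
    rw [pvStepB_find, hk]
    simp only [Option.map_some, decP, hdiv, hmod, hr]
    have hj'1 : j' % 4 < 4 := by omega
    have hj'2 : 4 * (j' / 4) + j' % 4 = j' := by omega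
    by_cases hjj : j < j'
    · rw [if_pos hjj, if_pos (by omega :
        ((pvR ch : Nat) : Int) < ((j' / 4 : Nat) : Int) ∨
          (((pvR ch : Nat) : Int) = ((j' / 4 : Nat) : Int) ∧ ((k : Nat) : Int) < ((j' % 4 : Nat) : Int)))]
    · rw [if_neg hjj, if_neg (by omega :
        ¬(((pvR ch : Nat) : Int) < ((j' / 4 : Nat) : Int) ∨
          (((pvR ch : Nat) : Int) = ((j' / 4 : Nat) : Int) ∧ ((k : Nat) : Int) < ((j' % 4 : Nat) : Int))))]

theorem pvFoldB_char (cs : List String) :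
    (cs.foldl pvStepB none = (pvD 0 12 cs).map decP) ∧
    (∀ (j : Nat) (chb : String), j < 12 →
      cs.foldl pvStepB (some (decP (j, chb))) = some (decP ((pvD 0 j cs).getD (j, chb)))) := by
  induction cs with
  | nil => exact ⟨by simp [pvD_nil], fun j chb _ => by simp [pvD_nil]⟩
  | cons x cs ih =>
    cases hp : pvP x with
    | none =>
      constructor
      · simp only [List.foldl_cons, pvStepB_none hp, ih.1, pvD_cons, hp]
      · intro j chb hj
        simp only [List.foldl_cons, pvStepB_none hp, ih.2 j chb hj, pvD_cons, hp]
    | some j =>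
      obtain ⟨hj12, -⟩ := pvP_lt hp
      obtain ⟨hs1, hs2⟩ := pvStepB_some hp
      constructor
      · simp only [List.foldl_cons, hs1, ih.2 j x hj12]
        rw [pvD_cons]
        simp only [hp]
        rw [if_pos (by omega), Nat.sub_zero, pvOr_some_map]
      · intro j' chb hj'
        simp only [List.foldl_cons, hs2 j' chb]
        by_cases hjj : j < j'
        · rw [if_pos hjj, ih.2 j x hj12, pvD_cons]
          simp only [hp]
          rw [if_pos (by omega), Nat.sub_zero, pvOr_some_getD]
        · rw [if_neg hjj, ih.2 j' chb hj', pvD_cons]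
          simp only [hp]
          rw [if_neg (by omega)]

theorem pvFoldF_some (cs : List String) (v : String) : cs.foldl pvStepF (some v) = some v := by
  induction cs with
  | nil => rfl
  | cons x t ih => simpa [pvStepF] using ih

theorem pvFoldF_none (cs : List String) : cs.foldl pvStepF none = cs.head? := by
  cases cs with
  | nil => rfl
  | cons x t => simpa [pvStepF] using pvFoldF_some t x

theorem pvFoldl_pair (l : List String) (b : Option (Int × Int × String)) (f : Option String) :
    l.foldl (fun st ch => (pvStepB st.1 ch, pvStepF st.2 ch)) (b, f) =
      (l.foldl pvStepB b, l.foldl pvStepF f) := by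
  induction l generalizing b f with
  | nil => rfl
  | cons x t ih => simpa using ih (pvStepB b x) (pvStepF f x)

theorem pvStep_eq (st : Option (Int × Int × String) × Option String) (ch : String) :
    detect_fitc_channel_altStep st ch =
      if !pvExcl ch then (pvStepB st.1 ch, pvStepF st.2 ch) else st := by
  obtain ⟨b, f⟩ := st
  by_cases he : (PySem.Str.isIn "FSC" ch || PySem.Str.isIn "SSC" ch || PySem.Str.isIn "Time" ch || PySem.Str.isIn "Width" ch) = true
  · have hne : ¬ ((!pvExcl ch) = true) := by unfold pvExcl; rw [he]; simp
    unfold detect_fitc_channel_altStep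
    rw [if_pos he, if_neg hne]
  · simp only [Bool.not_eq_true] at he
    have hp2 : (!pvExcl ch) = true := by unfold pvExcl; rw [he]; rfl
    unfold detect_fitc_channel_altStep pvStepB pvStepF
    rw [if_neg (by simp only [he, Bool.false_eq_true, not_false_eq_true] :
          ¬ ((PySem.Str.isIn "FSC" ch || PySem.Str.isIn "SSC" ch || PySem.Str.isIn "Time" ch || PySem.Str.isIn "Width" ch) = true)),
        if_pos hp2]
    cases hF : (PySem.List.enumerate ["FITC", "FL1", "B530", "488"]).find?
        (fun p => PySem.Str.isIn p.2 (PySem.Str.upper ch)) with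
    | none => cases f <;> rfl
    | some t =>
      obtain ⟨k, w⟩ := t
      cases b with
      | none => cases f <;> rfl
      | some tb =>
        obtain ⟨rb, kb, chb⟩ := tb
        cases f <;> dsimp only <;> (repeat' split) <;> rfl

theorem pvB_canon (cn : List String) :
    detect_fitc_channel_alt cn = pvCanon (cn.filter (fun ch => !pvExcl ch)) := by
  unfold detect_fitc_channel_alt
  rw [show detect_fitc_channel_altStep =
        (fun st ch => if (!pvExcl ch) = true then (pvStepB st.1 ch, pvStepF st.2 ch) else st) from
      funext fun st => funext fun ch => pvStep_eq st ch]
  rw [← List.foldl_filter (p := fun ch => !pvExcl ch)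
        (f := fun st ch => (pvStepB st.1 ch, pvStepF st.2 ch))]
  rw [pvFoldl_pair, (pvFoldB_char _).1, pvFoldF_none]
  unfold pvCanon
  cases hd : pvD 0 12 (cn.filter fun ch => !pvExcl ch) with
  | none => simp
  | some t => obtain ⟨j, c⟩ := t; simp [decP]

theorem pvD_none_mem (n : Nat) : ∀ (i : Nat) (cs : List String), pvD i n cs = none →
    ∀ ch ∈ cs, ∀ j, i ≤ j → j < i + n → pvP ch ≠ some j := by
  induction n with
  | zero => intro i cs _ ch hch j h1 h2; omega
  | succ n ih =>
    intro i cs hd ch hch j h1 h2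
    simp only [pvD] at hd
    obtain ⟨hf, hrest⟩ := Option.or_eq_none_iff.mp hd
    by_cases hji : j = i
    · subst hji
      have := List.find?_eq_none.mp (Option.map_eq_none_iff.mp hf) ch hch
      simpa using this
    · exact ih (i+1) cs hrest ch hch j (by omega) (by omega)

theorem pvP_none_of {ch : String} (h0 : pvM 0 ch = false) (h1 : pvM 1 ch = false)
    (h2 : pvM 2 ch = false) (h3 : pvM 3 ch = false) : pvP ch = none := by
  unfold pvP pvKw
  simp [h0, h1, h2, h3]

theorem ite_ne_nil_append {α : Type} (acc l : List α) :
    (if l ≠ [] then acc ++ l else acc) = acc ++ l := by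
  cases l <;> simp

theorem pvIf_filter (p : String → Bool) (m : List String) (x : Option String) :
    (if m.filter p ≠ [] then (m.filter p).head? else x) = (m.find? p).or x := by
  cases hf : m.find? p with
  | none =>
    have h2 : (m.filter p).head? = none := by rw [List.head?_filter, hf]
    have hnil : m.filter p = [] := List.head?_eq_none_iff.mp h2
    simp [hnil]
  | some c =>
    have h2 : (m.filter p).head? = some c := by rw [List.head?_filter, hf]
    have h3 : m.filter p ≠ [] := by intro e; rw [e] at h2; simp at h2
    simp [h3, h2]

theorem pvA_canon (cn : List String) :
    detect_fitc_channel cn = pvCanon (cn.filter (fun ch => !pvExcl ch)) := by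
  unfold detect_fitc_channel
  dsimp only
  have hcand : (fun ch => !(["FSC","SSC","Time","Width"] : List String).any (fun p => PySem.Str.isIn p ch)) = (fun ch => !pvExcl ch) := by
    funext ch
    unfold pvExcl
    cases a : PySem.Str.isIn "FSC" ch <;> cases b : PySem.Str.isIn "SSC" ch <;>
      cases c : PySem.Str.isIn "Time" ch <;> cases d : PySem.Str.isIn "Width" ch <;>
      (simp only [List.any_cons, List.any_nil]; rw [a, b, c, d]; rfl)
  rw [hcand]
  simp only [List.foldl_cons, List.foldl_nil, ite_ne_nil_append, List.nil_append, List.append_assoc]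
  rw [show PySem.Str.upper "FITC" = "FITC" from by decide,
      show PySem.Str.upper "FL1" = "FL1" from by decide,
      show PySem.Str.upper "B530" = "B530" from by decide,
      show PySem.Str.upper "488" = "488" from by decide]
  rw [show (fun ch => PySem.Str.isIn "FITC" (PySem.Str.upper ch)) = pvM 0 from rfl,
      show (fun ch => PySem.Str.isIn "FL1" (PySem.Str.upper ch)) = pvM 1 from rfl,
      show (fun ch => PySem.Str.isIn "B530" (PySem.Str.upper ch)) = pvM 2 from rfl,
      show (fun ch => PySem.Str.isIn "488" (PySem.Str.upper ch)) = pvM 3 from rfl,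
      show (fun ch => PySem.Str.isIn "-H" ch || PySem.Str.isIn "H-" ch) = pvH from rfl,
      show (fun ch => PySem.Str.isIn "-A" ch || PySem.Str.isIn "A-" ch) = pvA from rfl]
  set cs := cn.filter (fun ch => !pvExcl ch) with hcs
  set m := cs.filter (pvM 0) ++ (cs.filter (pvM 1) ++ (cs.filter (pvM 2) ++ cs.filter (pvM 3))) with hm
  by_cases hmn : m = []
  · rw [if_neg (by simp [hmn])]
    have hfe : ∀ k, cs.filter (pvM k) = [] → ∀ ch ∈ cs, pvM k ch = false := by
      intro k hk ch hch
      have := List.filter_eq_nil_iff.mp hk ch hch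
      simpa using this
    obtain ⟨e0, e1, e2, e3⟩ : cs.filter (pvM 0) = [] ∧ cs.filter (pvM 1) = [] ∧
        cs.filter (pvM 2) = [] ∧ cs.filter (pvM 3) = [] := by
      have := hm ▸ hmn
      simp only [List.append_eq_nil_iff] at this
      tauto
    have hd := pvD_none_of 0 12 cs (fun ch hch =>
      pvP_none_of (hfe 0 e0 ch hch) (hfe 1 e1 ch hch) (hfe 2 e2 ch hch) (hfe 3 e3 ch hch))
    unfold pvCanon
    rw [hd]
    cases cs <;> simp
  · rw [if_pos hmn, pvIf_filter pvA m, pvIf_filter pvH m]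
    rw [hm]
    simp only [List.find?_append, List.head?_append, List.find?_filter, List.head?_filter,
      Option.or_assoc]
    have c0 : cs.find? (fun a => decide (pvM 0 a = true ∧ pvH a = true)) = cs.find? (pvQ 0) :=
      pvFind_congr (fun x _ => by by_cases h1 : pvM 0 x <;> by_cases h2 : pvH x <;> simp [pvQ, h1, h2])
    have c1 : cs.find? (fun a => decide (pvM 1 a = true ∧ pvH a = true)) = cs.find? (pvQ 1) :=
      pvFind_congr (fun x _ => by by_cases h1 : pvM 1 x <;> by_cases h2 : pvH x <;> simp [pvQ, h1, h2])
    have c2 : cs.find? (fun a => decide (pvM 2 a = true ∧ pvH a = true)) = cs.find? (pvQ 2) :=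
      pvFind_congr (fun x _ => by by_cases h1 : pvM 2 x <;> by_cases h2 : pvH x <;> simp [pvQ, h1, h2])
    have c3 : cs.find? (fun a => decide (pvM 3 a = true ∧ pvH a = true)) = cs.find? (pvQ 3) :=
      pvFind_congr (fun x _ => by by_cases h1 : pvM 3 x <;> by_cases h2 : pvH x <;> simp [pvQ, h1, h2])
    have c4 : cs.find? (fun a => decide (pvM 0 a = true ∧ pvA a = true)) = cs.find? (pvQ 4) :=
      pvFind_congr (fun x _ => by by_cases h1 : pvM 0 x <;> by_cases h2 : pvA x <;> simp [pvQ, h1, h2])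
    have c5 : cs.find? (fun a => decide (pvM 1 a = true ∧ pvA a = true)) = cs.find? (pvQ 5) :=
      pvFind_congr (fun x _ => by by_cases h1 : pvM 1 x <;> by_cases h2 : pvA x <;> simp [pvQ, h1, h2])
    have c6 : cs.find? (fun a => decide (pvM 2 a = true ∧ pvA a = true)) = cs.find? (pvQ 6) :=
      pvFind_congr (fun x _ => by by_cases h1 : pvM 2 x <;> by_cases h2 : pvA x <;> simp [pvQ, h1, h2])
    have c7 : cs.find? (fun a => decide (pvM 3 a = true ∧ pvA a = true)) = cs.find? (pvQ 7) :=
      pvFind_congr (fun x _ => by by_cases h1 : pvM 3 x <;> by_cases h2 : pvA x <;> simp [pvQ, h1, h2])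
    have c8 : cs.find? (pvM 0) = cs.find? (pvQ 8) :=
      pvFind_congr (fun x _ => by simp [pvQ])
    have c9 : cs.find? (pvM 1) = cs.find? (pvQ 9) :=
      pvFind_congr (fun x _ => by simp [pvQ])
    have c10 : cs.find? (pvM 2) = cs.find? (pvQ 10) :=
      pvFind_congr (fun x _ => by simp [pvQ])
    have c11 : cs.find? (pvM 3) = cs.find? (pvQ 11) :=
      pvFind_congr (fun x _ => by simp [pvQ])
    rw [c0, c1, c2, c3, c4, c5, c6, c7, c8, c9, c10, c11]
    have hEchain : pvE 0 12 cs =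
        (cs.find? (pvQ 0)).or ((cs.find? (pvQ 1)).or ((cs.find? (pvQ 2)).or ((cs.find? (pvQ 3)).or
          ((cs.find? (pvQ 4)).or ((cs.find? (pvQ 5)).or ((cs.find? (pvQ 6)).or ((cs.find? (pvQ 7)).or
            ((cs.find? (pvQ 8)).or ((cs.find? (pvQ 9)).or ((cs.find? (pvQ 10)).or
              (cs.find? (pvQ 11)))))))))))) := by
      have h1 : pvE 0 12 cs =
          (cs.find? (pvQ 0)).or ((cs.find? (pvQ 1)).or ((cs.find? (pvQ 2)).or ((cs.find? (pvQ 3)).or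
            ((cs.find? (pvQ 4)).or ((cs.find? (pvQ 5)).or ((cs.find? (pvQ 6)).or ((cs.find? (pvQ 7)).or
              ((cs.find? (pvQ 8)).or ((cs.find? (pvQ 9)).or ((cs.find? (pvQ 10)).or
                ((cs.find? (pvQ 11)).or none))))))))))) := rfl
      rw [h1, Option.or_none]
    rw [← hEchain, pvE_eq_D 12 0 cs (by norm_num) (fun ch _ j hj => absurd hj (by omega))]
    unfold pvCanon
    cases hd : pvD 0 12 cs with
    | none =>
      exfalso
      obtain ⟨x, hx⟩ := List.exists_mem_of_ne_nil m hmn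
      rw [hm] at hx
      simp only [List.mem_append, List.mem_filter] at hx
      obtain ⟨hxcs, k, hk4, hxk⟩ : x ∈ cs ∧ ∃ k, k < 4 ∧ pvM k x = true := by
        rcases hx with ⟨h, hp⟩ | ⟨h, hp⟩ | ⟨h, hp⟩ | ⟨h, hp⟩
        exacts [⟨h, 0, by omega, hp⟩, ⟨h, 1, by omega, hp⟩, ⟨h, 2, by omega, hp⟩, ⟨h, 3, by omega, hp⟩]
      have hq : pvQ (8 + k) x = true := by
        have h84 : (8 + k) % 4 = k := by omega
        have h84' : (8 + k) / 4 = 2 := by omega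
        simp [pvQ, h84, h84']
        exact hxk
      obtain ⟨p, hp, -⟩ := pvP_min (by omega) hq
      exact pvD_none_mem 12 0 cs hd x hxcs p (by omega) (by simpa using (pvP_lt hp).1) hp
    | some t => obtain ⟨j, c⟩ := t; rfl

-- ===== VERDICT (by name: the statement is the Claim_ definition above) =====
theorem detect_fitc_channel_spec : Claim_equal_detect_fitc_channel := by
  intro cn _
  unfold Spec_detect_fitc_channel
  rw [pvA_canon, pvB_canon]
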